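-- pv_equiv track=rewrite | github.com/romnn/djtool | experimental/audiooffset.py | _inputs_swap_needed
-- ===== SOURCE A (Python) =====
-- def _inputs_swap_needed(shape1, shape2, axes=None):
--     if not shape1:
--         return False
--
--     if axes is None:
--         axes = range(len(shape1))
--
--     ok1 = all(shape1[i] >= shape2[i] for i in axes)
--     ok2 = all(shape2[i] >= shape1[i] for i in axes)
--
--     if not (ok1 or ok2):
--         raise ValueError(
--             "For 'valid' mode, one must be at least "
--             "as large as the other in every dimension"
--         )
--
--     return not ok1
-- ===== SOURCE B (Python) =====
-- def _inputs_swap_needed(shape1, shape2, axes=None):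
--     if not shape1:
--         return False
--
--     if axes is None:
--         axes = range(len(shape1))
--
--     # set of comparison signs: -1 where shape1 < shape2, 0 where equal, 1 where >
--     signs = {(shape1[i] > shape2[i]) - (shape1[i] < shape2[i]) for i in axes}
--
--     if 1 in signs and -1 in signs:
--         raise ValueError(
--             "For 'valid' mode, one must be at least "
--             "as large as the other in every dimension"
--         )
--
--     return -1 in signs
-- ===== Notes on version B (the rewrite author's own statement) =====
-- stated objective: alternative
-- what changed: Replaces the two all()-dominance scans and boolean flags by building the set of per-axis comparison signs (-1/0/1) in one comprehension and deciding both the ValueError and the result by membership tests on that set.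
import Mathlib
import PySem

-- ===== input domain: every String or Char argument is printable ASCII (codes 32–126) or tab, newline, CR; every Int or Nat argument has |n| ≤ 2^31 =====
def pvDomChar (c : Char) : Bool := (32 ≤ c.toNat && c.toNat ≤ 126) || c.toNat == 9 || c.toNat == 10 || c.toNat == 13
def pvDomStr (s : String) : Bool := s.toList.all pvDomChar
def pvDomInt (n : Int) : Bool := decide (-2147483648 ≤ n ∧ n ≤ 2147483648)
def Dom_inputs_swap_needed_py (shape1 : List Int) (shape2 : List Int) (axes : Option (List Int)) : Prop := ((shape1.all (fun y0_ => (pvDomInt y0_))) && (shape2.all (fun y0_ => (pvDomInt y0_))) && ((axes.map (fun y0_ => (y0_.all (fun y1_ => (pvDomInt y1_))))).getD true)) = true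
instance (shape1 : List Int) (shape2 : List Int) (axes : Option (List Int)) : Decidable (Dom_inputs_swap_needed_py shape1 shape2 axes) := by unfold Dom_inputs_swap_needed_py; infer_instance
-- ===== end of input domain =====

-- B replaces A's two all()-dominance scans by one set of per-axis comparison signs, answered by membership; same return value wherever A returns (Pre_ excludes A's IndexError/ValueError inputs).

-- ===== PORT A =====
-- axes resolved as in Python: None -> range(len(shape1))
def pvAxes (shape1 : List Int) (axes : Option (List Int)) : List Int :=
  match axes with
  | none => (List.range shape1.length).map Int.ofNat
  | some l => l

-- shape[i] with Python indexing; under Pre_ every index is in range, so getD 0 is never taken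
def pvAt (shape : List Int) (i : Int) : Int := (PySem.List.pyGet? shape i).getD 0

def inputs_swap_needed_py (shape1 : List Int) (shape2 : List Int) (axes : Option (List Int)) : Bool :=
  if shape1 = [] then false
  else
    let axs := pvAxes shape1 axes
    let ok1 := axs.all (fun i => decide (pvAt shape1 i ≥ pvAt shape2 i))
    let _ok2 := axs.all (fun i => decide (pvAt shape2 i ≥ pvAt shape1 i))
    -- the 'raise ValueError' branch (¬(ok1 ∨ ok2)) lies outside Pre_
    !ok1

-- ===== PORT B =====
-- (a > b) - (a < b) : the Python comparison sign
def pvSign (a b : Int) : Int := (if a > b then 1 else 0) - (if a < b then 1 else 0)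

def inputs_swap_needed_py_alt (shape1 : List Int) (shape2 : List Int) (axes : Option (List Int)) : Bool :=
  if shape1 = [] then false
  else
    let signs : PySem.Set Int :=
      PySem.Set.ofList ((pvAxes shape1 axes).map (fun i => pvSign (pvAt shape1 i) (pvAt shape2 i)))
    -- the 'raise ValueError' branch (1 ∈ signs ∧ -1 ∈ signs) lies outside Pre_
    PySem.Set.contains signs (-1)

-- ===== PRECONDITION & SPEC =====
-- Pre_ excludes exactly the inputs where Python A raises: an axis index out of range for
-- shape1 or shape2 (IndexError), or neither shape dominating the other on all axes (ValueError).
def Pre_inputs_swap_needed_py (shape1 : List Int) (shape2 : List Int) (axes : Option (List Int)) : Prop :=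
  shape1 = [] ∨
  ((∀ i ∈ pvAxes shape1 axes, (PySem.List.pyGet? shape1 i).isSome ∧ (PySem.List.pyGet? shape2 i).isSome) ∧
   ((∀ i ∈ pvAxes shape1 axes, pvAt shape1 i ≥ pvAt shape2 i) ∨
    (∀ i ∈ pvAxes shape1 axes, pvAt shape2 i ≥ pvAt shape1 i)))

instance (shape1 : List Int) (shape2 : List Int) (axes : Option (List Int)) : Decidable (Pre_inputs_swap_needed_py shape1 shape2 axes) := by unfold Pre_inputs_swap_needed_py; infer_instance

def pvWitness_inputs_swap_needed_py : List Int × List Int × Option (List Int) := ([3, 2], [1, 2], none)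

def Spec_inputs_swap_needed_py (shape1 : List Int) (shape2 : List Int) (axes : Option (List Int)) (out : Bool) : Prop := out = inputs_swap_needed_py_alt shape1 shape2 axes
instance (shape1 : List Int) (shape2 : List Int) (axes : Option (List Int)) (out : Bool) : Decidable (Spec_inputs_swap_needed_py shape1 shape2 axes out) := by unfold Spec_inputs_swap_needed_py; infer_instance

-- ===== CLAIM (what is proved, stated in full; the proofs are below) =====
def Claim_equal_inputs_swap_needed_py : Prop := ∀ (shape1 : List Int) (shape2 : List Int) (axes : Option (List Int)), Dom_inputs_swap_needed_py shape1 shape2 axes → Pre_inputs_swap_needed_py shape1 shape2 axes → Spec_inputs_swap_needed_py shape1 shape2 axes (inputs_swap_needed_py shape1 shape2 axes)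

-- ===== LEMMAS AND PROOFS =====

-- -1 is in the sign set iff some axis has shape1[i] < shape2[i], i.e. iff A's ok1 scan fails
theorem contains_neg_one_eq (shape1 shape2 : List Int) (l : List Int) :
    PySem.Set.contains
        (PySem.Set.ofList (l.map (fun i => pvSign (pvAt shape1 i) (pvAt shape2 i)))) (-1)
      = !(l.all (fun i => decide (pvAt shape1 i ≥ pvAt shape2 i))) := by
  rw [Bool.eq_iff_iff]
  simp only [PySem.Set.contains, List.contains_iff_mem, PySem.Set.mem_ofList, List.mem_map,
    Bool.not_eq_eq_eq_not, Bool.not_true, List.all_eq_false, decide_eq_true_eq, ge_iff_le, not_le]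
  constructor
  · rintro ⟨i, hi, hs⟩
    refine ⟨i, hi, ?_⟩
    unfold pvSign at hs
    split_ifs at hs <;> omega
  · rintro ⟨i, hi, hlt⟩
    refine ⟨i, hi, ?_⟩
    unfold pvSign
    split_ifs <;> omega

-- ===== VERDICT (by name: the statement is the Claim_ definition above) =====
theorem inputs_swap_needed_py_spec : Claim_equal_inputs_swap_needed_py := by
  intro shape1 shape2 axes _ _
  unfold Spec_inputs_swap_needed_py inputs_swap_needed_py inputs_swap_needed_py_alt
  by_cases h : shape1 = []
  · simp [h]
  · simp only [if_neg h, contains_neg_one_eq]
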